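-- pv_equiv track=rewrite | github.com/wbf1015/HLT_2023_SummerTest | code/speech2text/wordVector.py | construct_dic
-- ===== SOURCE A (Python) =====
-- def construct_dic(dic):
--     reflection = {'P': 0, 'S': 1, 'E': 2}  # P是padding的符号，为了后面做mask方便所以这里搞成0了 S是开始符号，E是结束符号
--     words = []
--     count = 3
--     for k, v in dic.items():
--         for word in v:
--             if word in words:
--                 continue
--             else:
--                 words.append(word)
--                 reflection[word] = count
--                 count += 1
--     return reflection
-- ===== SOURCE B (Python) =====
-- def construct_dic(dic):
--     flat = [w for v in dic.values() for w in v]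
--     first = {}
--     for pos, w in reversed(list(enumerate(flat))):
--         first[w] = pos          # walking backwards, the earliest occurrence wins
--     reflection = {'P': 0, 'S': 1, 'E': 2}
--     for i, w in enumerate(sorted(first, key=first.__getitem__), start=3):
--         reflection[w] = i
--     return reflection
-- ===== Notes on version B (the rewrite author's own statement) =====
-- stated objective: alternative
-- what changed: Replaces A's guarded accumulate-and-count loop (membership scan on a growing list, manual counter) with a rank-by-first-occurrence algorithm: a reverse overwrite pass records each word's first-occurrence position in a dict, the words are sorted by that position, and indices are assigned by a branch-free enumerate(sorted_words, 3) pass.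
import Mathlib
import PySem

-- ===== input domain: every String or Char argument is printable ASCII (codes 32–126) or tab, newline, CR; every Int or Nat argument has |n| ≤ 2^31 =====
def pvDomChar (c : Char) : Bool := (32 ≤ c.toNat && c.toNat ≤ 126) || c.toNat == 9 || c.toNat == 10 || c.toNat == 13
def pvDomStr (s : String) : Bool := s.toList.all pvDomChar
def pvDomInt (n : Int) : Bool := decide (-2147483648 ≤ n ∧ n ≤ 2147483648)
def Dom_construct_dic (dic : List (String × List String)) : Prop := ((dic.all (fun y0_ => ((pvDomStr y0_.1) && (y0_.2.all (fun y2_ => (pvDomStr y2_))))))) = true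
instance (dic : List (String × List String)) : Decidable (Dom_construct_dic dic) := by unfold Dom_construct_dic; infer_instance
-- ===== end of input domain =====

-- B replaces A's guarded accumulate-and-count loop by a different algorithm: a reverse
-- overwrite pass records each word's first-occurrence position, and the words are then
-- sorted by that position and assigned indices by a branch-free enumerate(·, 3) pass.


-- ===== PORT A =====
-- A's loop body: test membership in the accumulated `words` list, append, assign the
-- running counter, bump it.  State = (reflection, words, count).
def construct_dic_step (st : PySem.Dict String Int × List String × Int) (word : String) :
    PySem.Dict String Int × List String × Int :=
  if word ∈ st.2.1 then st
  else (st.1.insert word st.2.2, st.2.1 ++ [word], st.2.2 + 1)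

def construct_dic (dic : List (String × List String)) : List (String × Int) :=
  let reflection : PySem.Dict String Int := PySem.Dict.ofList [("P", 0), ("S", 1), ("E", 2)]
  let final := dic.foldl (fun st kv => kv.2.foldl construct_dic_step st) (reflection, ([] : List String), (3 : Int))
  final.1.items

-- ===== PORT B =====
def construct_dic_alt (dic : List (String × List String)) : List (String × Int) :=
  let flat := dic.flatMap (fun kv => kv.2)
  -- for pos, w in reversed(list(enumerate(flat))): first[w] = pos
  let first := (PySem.List.enumerate flat 0).reverse.foldl
                 (fun d p => d.insert p.2 p.1) (PySem.Dict.empty : PySem.Dict String Int)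
  let order := PySem.List.sorted first.keys (fun w => first.getD w 0) false
  let reflection : PySem.Dict String Int := PySem.Dict.ofList [("P", 0), ("S", 1), ("E", 2)]
  ((PySem.List.enumerate order 3).foldl (fun d p => d.insert p.2 p.1) reflection).items

-- ===== PRECONDITION & SPEC =====
def Spec_construct_dic (dic : List (String × List String)) (out : List (String × Int)) : Prop := out = construct_dic_alt dic
instance (dic : List (String × List String)) (out : List (String × Int)) : Decidable (Spec_construct_dic dic out) := by unfold Spec_construct_dic; infer_instance

-- ===== CLAIM (what is proved, stated in full; the proofs are below) =====
def Claim_equal_construct_dic : Prop := ∀ (dic : List (String × List String)), Dom_construct_dic dic → Spec_construct_dic dic (construct_dic dic)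

-- ===== LEMMAS AND PROOFS =====

-- first occurrences of `ws` not already in `seen`, in order
def dedupFrom (seen : List String) : List String → List String
  | [] => []
  | w :: ws => if w ∈ seen then dedupFrom seen ws else w :: dedupFrom (seen ++ [w]) ws

lemma foldl_add_eq_dedupFrom (ws seen : List String) :
    ws.foldl PySem.Set.add seen = seen ++ dedupFrom seen ws := by
  induction ws generalizing seen with
  | nil => simp [dedupFrom]
  | cons w ws ih =>
      simp only [List.foldl_cons, dedupFrom, PySem.Set.add]
      by_cases h : w ∈ seen
      · simp [h, ih]
      · simp [h, ih (seen ++ [w])]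

lemma dedup_eq_dedupFrom (ws : List String) :
    PySem.List.dedup ws = dedupFrom [] ws := by
  have := foldl_add_eq_dedupFrom ws []
  simpa [PySem.List.dedup, PySem.Set.ofList] using this

lemma mem_dedupFrom {a : String} (seen ws : List String) (h : a ∈ dedupFrom seen ws) :
    a ∉ seen ∧ a ∈ ws := by
  induction ws generalizing seen with
  | nil => simp [dedupFrom] at h
  | cons w ws ih =>
      simp only [dedupFrom] at h
      by_cases hw : w ∈ seen
      · rw [if_pos hw] at h
        rcases ih seen h with ⟨h1, h2⟩
        exact ⟨h1, List.mem_cons_of_mem _ h2⟩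
      · rw [if_neg hw] at h
        rcases List.mem_cons.mp h with h | h
        · exact ⟨h ▸ hw, h ▸ List.mem_cons_self⟩
        · rcases ih (seen ++ [w]) h with ⟨h1, h2⟩
          simp only [List.mem_append, List.mem_singleton, not_or] at h1
          exact ⟨h1.1, List.mem_cons_of_mem _ h2⟩

lemma idxOf_cons_self (w : String) (t : List String) : (w :: t).idxOf w = 0 := by
  simp

lemma idxOf_cons_ne {w a : String} (h : a ≠ w) (t : List String) :
    (w :: t).idxOf a = t.idxOf a + 1 := by
  have hb : (w == a) = false := by simp [Ne.symm h]
  simp [List.idxOf_cons, hb]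

-- dedupFrom lists first occurrences, so idxOf is strictly increasing along it
lemma pairwise_idxOf_dedupFrom (ws seen : List String) :
    (dedupFrom seen ws).Pairwise (fun a b => ws.idxOf a < ws.idxOf b) := by
  induction ws generalizing seen with
  | nil => simp [dedupFrom]
  | cons w ws ih =>
      simp only [dedupFrom]
      by_cases hw : w ∈ seen
      · rw [if_pos hw]
        refine (ih seen).imp_of_mem ?_
        intro a b ha hb hab
        have hna : a ≠ w := fun h => (mem_dedupFrom seen ws ha).1 (h ▸ hw)
        have hnb : b ≠ w := fun h => (mem_dedupFrom seen ws hb).1 (h ▸ hw)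
        rw [idxOf_cons_ne hna, idxOf_cons_ne hnb]
        omega
      · rw [if_neg hw]
        rw [List.pairwise_cons]
        constructor
        · intro b hb
          have hnb : b ≠ w := by
            intro h
            have := (mem_dedupFrom (seen ++ [w]) ws hb).1
            simp [h] at this
          rw [idxOf_cons_self, idxOf_cons_ne hnb]
          omega
        · refine (ih (seen ++ [w])).imp_of_mem ?_
          intro a b ha hb hab
          have hna : a ≠ w := by
            intro h
            have := (mem_dedupFrom (seen ++ [w]) ws ha).1
            simp [h] at this
          have hnb : b ≠ w := by
            intro h
            have := (mem_dedupFrom (seen ++ [w]) ws hb).1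
            simp [h] at this
          rw [idxOf_cons_ne hna, idxOf_cons_ne hnb]
          omega

-- the reverse overwrite pass: the value surviving at key w is the FIRST pair with snd w
lemma getD_revfold (l : List (Int × String)) (d : PySem.Dict String Int) (w : String) :
    (l.reverse.foldl (fun d p => d.insert p.2 p.1) d).getD w 0 =
      match l.find? (fun p => p.2 == w) with
      | some p => p.1
      | none => d.getD w 0 := by
  induction l generalizing d with
  | nil => rfl
  | cons p t ih =>
      simp only [List.reverse_cons, List.foldl_append, List.foldl_cons, List.foldl_nil]
      rw [PySem.Dict.getD_insert, List.find?_cons]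
      by_cases h : w = p.2
      · subst h
        simp
      · have hb : (p.2 == w) = false := by simp [Ne.symm h]
        rw [if_neg h, ih]
        simp [hb]

lemma find?_enumerate_eq (ws : List String) (s : Int) (w : String) (hw : w ∈ ws) :
    (PySem.List.enumerate ws s).find? (fun p => p.2 == w) = some (s + (ws.idxOf w : Int), w) := by
  induction ws generalizing s with
  | nil => simp at hw
  | cons x t ih =>
      rw [PySem.List.enumerate_cons, List.find?_cons]
      by_cases h : x = w
      · subst h
        simp
      · have hb : (x == w) = false := by simp [h]
        have hw' : w ∈ t := by
          rcases List.mem_cons.mp hw with h' | h'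
          · exact absurd h'.symm h
          · exact h'
        simp only [hb]
        rw [ih (s + 1) hw', idxOf_cons_ne (fun hh => h hh.symm) t]
        have : s + 1 + ((t.idxOf w : Int)) = s + (((t.idxOf w + 1 : Nat)) : Int) := by
          push_cast; ring
        rw [this]

-- keys of the reverse overwrite dict: the distinct words (in reverse-first-seen order)
lemma keys_revfold (flat : List String) :
    ((PySem.List.enumerate flat 0).reverse.foldl
        (fun d p => d.insert p.2 p.1) (PySem.Dict.empty : PySem.Dict String Int)).keys
      = PySem.List.dedup flat.reverse := by
  rw [PySem.Dict.keys_foldl_insert_key ((PySem.List.enumerate flat 0).reverse)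
        (fun p : Int × String => p.2) (fun _ p => p.1) PySem.Dict.empty]
  have h2 : ((PySem.List.enumerate flat 0).reverse.map (fun p : Int × String => p.2)) = flat.reverse := by
    rw [List.map_reverse, PySem.List.map_snd_enumerate]
  rw [h2]
  simp [PySem.Set.update, PySem.Set.ofList, PySem.Dict.keys_empty]

lemma nodup_dedupFrom (ws : List String) : (dedupFrom [] ws).Nodup := by
  rw [← dedup_eq_dedupFrom]
  exact PySem.List.nodup_dedup ws

-- B's sort stage recovers exactly the first-occurrence order (= A's `words` list)
lemma sorted_eq_dedup (flat : List String) :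
    (PySem.List.sorted
        ((PySem.List.enumerate flat 0).reverse.foldl
          (fun d p => d.insert p.2 p.1) (PySem.Dict.empty : PySem.Dict String Int)).keys
        (fun w => ((PySem.List.enumerate flat 0).reverse.foldl
          (fun d p => d.insert p.2 p.1) (PySem.Dict.empty : PySem.Dict String Int)).getD w 0)
        false)
      = dedupFrom [] flat := by
  apply PySem.List.sorted_eq_of_perm_of_pairwise_lt
  · rw [keys_revfold]
    apply (List.perm_ext_iff_of_nodup (nodup_dedupFrom flat) (PySem.List.nodup_dedup _)).mpr
    intro a
    rw [← dedup_eq_dedupFrom]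
    simp
  · refine (pairwise_idxOf_dedupFrom flat []).imp_of_mem ?_
    intro a b ha hb hab
    have hma : a ∈ flat := (mem_dedupFrom [] flat ha).2
    have hmb : b ∈ flat := (mem_dedupFrom [] flat hb).2
    rw [getD_revfold, getD_revfold, find?_enumerate_eq flat 0 a hma, find?_enumerate_eq flat 0 b hmb]
    simp only [zero_add]
    exact_mod_cast hab

-- A's guarded loop over any word stream equals the insert-by-enumeration of the fresh dedup
lemma loop_eq (ws : List String) (d : PySem.Dict String Int) (words : List String) (c : Int) :
    (ws.foldl construct_dic_step (d, words, c)).1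
      = (PySem.List.enumerate (dedupFrom words ws) c).foldl (fun d p => d.insert p.2 p.1) d := by
  induction ws generalizing d words c with
  | nil => simp [dedupFrom]
  | cons w ws ih =>
      simp only [List.foldl_cons, construct_dic_step, dedupFrom]
      by_cases h : w ∈ words
      · simp only [h, if_pos]
        exact ih d words c
      · simp only [h, if_false, PySem.List.enumerate_cons, List.foldl_cons]
        exact ih (d.insert w c) (words ++ [w]) (c + 1)

lemma foldl_foldl_eq_flatMap (dic : List (String × List String))
    (st : PySem.Dict String Int × List String × Int) :
    dic.foldl (fun st kv => kv.2.foldl construct_dic_step st) st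
      = (dic.flatMap (fun kv => kv.2)).foldl construct_dic_step st := by
  induction dic generalizing st with
  | nil => rfl
  | cons kv dic ih => simp [List.flatMap_cons, List.foldl_append, ih]

-- ===== VERDICT (by name: the statement is the Claim_ definition above) =====
theorem construct_dic_spec : Claim_equal_construct_dic := by
  intro dic _
  show construct_dic dic = construct_dic_alt dic
  simp only [construct_dic, construct_dic_alt]
  rw [foldl_foldl_eq_flatMap, loop_eq, sorted_eq_dedup]
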